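-- pv_equiv track=rewrite | github.com/tteggu87/repo-docs-ontology-skills | scripts/ontology_registry_common.py | choose_canonical_alias
-- ===== SOURCE A (Python) =====
-- def choose_canonical_alias(aliases: list[str] | set[str]) -> str:
--     alias_list = [alias.strip() for alias in aliases if alias and alias.strip()]
--     if not alias_list:
--         return "Unknown Entity"
--
--     def score(alias: str) -> tuple[int, int, int, str]:
--         has_alpha = any(char.isalpha() for char in alias)
--         all_caps = int(has_alpha and alias.upper() == alias)
--         punctuation_penalty = alias.count(" ") + alias.count("-") + alias.count("_")
--         return (all_caps, punctuation_penalty, len(alias), alias.casefold())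
--
--     return sorted(alias_list, key=score)[0]
-- ===== SOURCE B (Python) =====
-- def choose_canonical_alias(aliases):
--     alias_list = [alias.strip() for alias in aliases if alias and alias.strip()]
--     if not alias_list:
--         return "Unknown Entity"
--
--     def score(alias):
--         has_alpha = any(char.isalpha() for char in alias)
--         all_caps = int(has_alpha and alias.upper() == alias)
--         punctuation_penalty = alias.count(" ") + alias.count("-") + alias.count("_")
--         return (all_caps, punctuation_penalty, len(alias), alias.casefold())
--
--     # single linear pass keeping the first alias with the strictly smallest score
--     # (strict < keeps the first-seen alias on ties, matching stable sorted(...)[0])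
--     best = alias_list[0]
--     best_score = score(best)
--     for alias in alias_list[1:]:
--         s = score(alias)
--         if s < best_score:
--             best, best_score = alias, s
--     return best
-- ===== Notes on version B (the rewrite author's own statement) =====
-- stated objective: faster
-- what changed: Replaces sorting the whole normalized list by a composite key and taking element 0 with a single linear selection pass that tracks the best alias and its cached score, updating only on strictly smaller score.
import Mathlib
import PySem

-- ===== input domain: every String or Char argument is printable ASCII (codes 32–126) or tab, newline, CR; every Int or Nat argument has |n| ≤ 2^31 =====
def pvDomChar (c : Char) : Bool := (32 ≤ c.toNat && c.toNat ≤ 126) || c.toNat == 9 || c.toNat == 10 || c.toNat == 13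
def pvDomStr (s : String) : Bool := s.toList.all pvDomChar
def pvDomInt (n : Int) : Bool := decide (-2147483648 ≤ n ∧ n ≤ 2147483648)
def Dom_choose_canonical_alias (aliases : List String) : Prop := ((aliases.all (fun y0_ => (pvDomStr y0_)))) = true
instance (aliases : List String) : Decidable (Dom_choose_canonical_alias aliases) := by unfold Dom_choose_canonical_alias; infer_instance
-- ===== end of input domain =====

-- B replaces the full stable sort by a single linear best-tracking pass (strict < keeps the first-seen alias on ties).

-- Shared helpers: both Pythons contain the identical normalization comprehension and `score` helper.
-- Python's 4-tuple key (all_caps, punct, len(alias), alias.casefold()) is encoded as the List Int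
-- [all_caps, punct, len] ++ code points of the casefolded alias: list lexicographic order equals the
-- tuple's lexicographic order (the first three entries are always present, and string comparison is
-- code-point lexicographic).  casefold is ported as lower, exact on the ASCII domain.
def pvScore (al : String) : List Int :=
  let has_alpha := al.toList.any PySem.Str.isalpha
  let all_caps : Int := if has_alpha && (PySem.Str.upper al == al) then 1 else 0
  let punctuation_penalty : Int :=
    (PySem.Str.count al " " : Int) + (PySem.Str.count al "-" : Int) + (PySem.Str.count al "_" : Int)
  [all_caps, punctuation_penalty, PySem.Str.len al] ++ (PySem.Str.lower al).toList.map (fun c => (c.toNat : Int))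

-- [alias.strip() for alias in aliases if alias and alias.strip()]
def pvNormalize (aliases : List String) : List String :=
  (aliases.filter (fun a => a != "" && PySem.Str.strip a != "")).map PySem.Str.strip

-- ===== PORT A =====
def choose_canonical_alias (aliases : List String) : String :=
  let alias_list := pvNormalize aliases
  match alias_list with
  | [] => "Unknown Entity"
  | a :: rest =>
    match PySem.List.sorted (a :: rest) pvScore false with
    | [] => ""           -- unreachable: sorting a nonempty list is nonempty
    | h :: _ => h

-- ===== PORT B =====
-- loop body: update (best, best_score) on strictly smaller score
def pvStep (st : String × List Int) (al : String) : String × List Int :=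
  let s := pvScore al
  if s < st.2 then (al, s) else st

def choose_canonical_alias_alt (aliases : List String) : String :=
  let alias_list := pvNormalize aliases
  match alias_list with
  | [] => "Unknown Entity"
  | best :: rest => (rest.foldl pvStep (best, pvScore best)).1

-- ===== PRECONDITION & SPEC =====
def Spec_choose_canonical_alias (aliases : List String) (out : String) : Prop := out = choose_canonical_alias_alt aliases
instance (aliases : List String) (out : String) : Decidable (Spec_choose_canonical_alias aliases out) := by unfold Spec_choose_canonical_alias; infer_instance

-- ===== CLAIM (what is proved, stated in full; the proofs are below) =====
def Claim_equal_choose_canonical_alias : Prop := ∀ (aliases : List String), Dom_choose_canonical_alias aliases → Spec_choose_canonical_alias aliases (choose_canonical_alias aliases)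

-- ===== LEMMAS AND PROOFS =====

-- invariant: the cached score is the score of the tracked best al
theorem pvStep_inv (rest : List String) (st : String × List Int) (h : st.2 = pvScore st.1) :
    (rest.foldl pvStep st).2 = pvScore (rest.foldl pvStep st).1 := by
  induction rest generalizing st with
  | nil => simpa using h
  | cons a t ih =>
      simp only [List.foldl_cons]
      apply ih
      simp only [pvStep]
      split <;> simp [h]

-- the head of A's stable sort is exactly B's linear selection
theorem head_sorted_eq_foldl (rest : List String) :
    ∀ a : String, ∃ t, PySem.List.sorted (a :: rest) pvScore false
      = (rest.foldl pvStep (a, pvScore a)).1 :: t := by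
  induction rest using List.reverseRecOn with
  | nil =>
      intro a
      exact ⟨[], by simp [PySem.List.sorted_eq_foldl_insertBy, PySem.List.insertBy]⟩
  | append_singleton ys y ih =>
      intro a
      obtain ⟨t, ht⟩ := ih a
      have hsplit : (a :: (ys ++ [y])) = (a :: ys) ++ [y] := by simp
      have hs : PySem.List.sorted (a :: (ys ++ [y])) pvScore false
          = PySem.List.insertBy (fun p q => decide (pvScore p < pvScore q)) y
              (PySem.List.sorted (a :: ys) pvScore false) := by
        rw [PySem.List.sorted_eq_foldl_insertBy, hsplit, List.foldl_append,
          ← PySem.List.sorted_eq_foldl_insertBy]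
        simp
      set prev := ys.foldl pvStep (a, pvScore a) with hprev
      have hinv : prev.2 = pvScore prev.1 := pvStep_inv ys (a, pvScore a) rfl
      have hfold : ((ys ++ [y]).foldl pvStep (a, pvScore a)).1
          = (pvStep prev y).1 := by
        rw [List.foldl_append, ← hprev]; simp only [List.foldl_cons, List.foldl_nil]
      rw [hs, ht]
      by_cases hlt : pvScore y < pvScore prev.1
      · refine ⟨prev.1 :: t, ?_⟩
        rw [hfold]
        simp only [PySem.List.insertBy, pvStep, hinv]
        simp [hlt]
      · refine ⟨PySem.List.insertBy (fun p q => decide (pvScore p < pvScore q)) y t, ?_⟩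
        rw [hfold]
        simp only [PySem.List.insertBy, pvStep, hinv]
        simp [hlt]

-- ===== VERDICT (by name: the statement is the Claim_ definition above) =====
theorem choose_canonical_alias_spec : Claim_equal_choose_canonical_alias := by
  intro aliases _
  unfold Spec_choose_canonical_alias choose_canonical_alias choose_canonical_alias_alt
  cases h : pvNormalize aliases with
  | nil => rfl
  | cons a rest =>
      obtain ⟨t, ht⟩ := head_sorted_eq_foldl rest a
      simp [ht]
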